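-- pv_equiv track=rewrite | github.com/tiubak/ai-trendings | api/dungeon-master/start.py | parse_scene_and_choices
-- ===== SOURCE A (Python) =====
-- def parse_scene_and_choices(text: str):
--     """Parse generated text into scene and choices"""
--     lines = [l.strip() for l in text.split('\n') if l.strip()]
--     scene_lines = []
--     choices = []
--     in_choices = False
--
--     for line in lines:
--         if line.lower().startswith(("choices:", "options:")):
--             in_choices = True
--             continue
--         if in_choices:
--             if line and line[0].isdigit() and ". " in line:
--                 choices.append(line.split(". ", 1)[-1])
--         else:
--             scene_lines.append(line)
--
--     scene = "\n".join(scene_lines)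
--     if not choices:
--         choices = ["Explore the path", "Investigate the object", "Rest and recover"]
--
--     return scene[:500], choices[:3]
-- ===== SOURCE B (Python) =====
-- def parse_scene_and_choices(text: str):
--     """Parse generated text into scene and choices.
--
--     Back-to-front traversal: walk the lines right-to-left, accumulating a
--     pending segment; whenever a header line is reached, the pending segment
--     is flushed into the choices (digit-prefixed lines extracted) and cleared.
--     What remains pending at the end is the scene (lines before any header).
--     """
--     lines = [l.strip() for l in text.split('\n') if l.strip()]
--     rev_pending = []
--     choices = []
--     for l in reversed(lines):
--         if l.lower().startswith(("choices:", "options:")):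
--             seg = [x.split(". ", 1)[-1] for x in reversed(rev_pending)
--                    if x[0].isdigit() and ". " in x]
--             choices = seg + choices
--             rev_pending = []
--         else:
--             rev_pending.append(l)
--     scene = "\n".join(reversed(rev_pending))[:500]
--     if not choices:
--         choices = ["Explore the path", "Investigate the object", "Rest and recover"]
--     return scene, choices[:3]
-- ===== Notes on version B (the rewrite author's own statement) =====
-- stated objective: alternative
-- what changed: Replaces A's forward loop with an in_choices flag by a back-to-front traversal: walk the lines in reverse accumulating a pending segment, flush the segment's digit-prefixed lines into the choices whenever a header line is reached, and what is still pending at the end is the scene.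
import Mathlib
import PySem

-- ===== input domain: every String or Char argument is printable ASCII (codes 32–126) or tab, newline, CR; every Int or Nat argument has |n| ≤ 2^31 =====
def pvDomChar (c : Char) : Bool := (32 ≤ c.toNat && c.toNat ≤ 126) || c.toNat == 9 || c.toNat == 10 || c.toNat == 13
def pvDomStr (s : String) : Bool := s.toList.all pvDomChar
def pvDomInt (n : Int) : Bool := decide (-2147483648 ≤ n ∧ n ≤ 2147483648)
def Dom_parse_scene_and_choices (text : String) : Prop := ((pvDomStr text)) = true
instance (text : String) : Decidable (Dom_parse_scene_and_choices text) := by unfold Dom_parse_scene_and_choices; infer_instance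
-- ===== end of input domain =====

-- B replaces A's forward loop with an in_choices flag by a back-to-front traversal that flushes the pending segment into the choices at each header line (alternative traversal order, same cost).


-- ===== PORT A =====
-- shared helpers (both Pythons contain these identical subexpressions)
-- line.lower().startswith(("choices:", "options:"))
def pvHdr (line : String) : Bool :=
  PySem.Str.startswith (PySem.Str.lower line) "choices:" ||
  PySem.Str.startswith (PySem.Str.lower line) "options:"

-- line[0].isdigit()  (false on empty line: guarded in both Pythons)
def pvDigitHead (line : String) : Bool :=
  match PySem.Str.pyGet? line 0 with
  | some c => PySem.Chars.isdigit c
  | none => false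

-- line.split(". ", 1)[-1]   (defaults unreachable: split of nonempty sep is some, result nonempty)
def pvExtract (line : String) : String :=
  (PySem.List.pyGet? ((PySem.Str.splitMax? line ". " 1).getD [line]) (-1)).getD line

-- [l.strip() for l in text.split('\n') if l.strip()]
def pvLines (text : String) : List String :=
  (((PySem.Str.split? text "\n").getD []).map PySem.Str.strip).filter (fun l => l != "")

-- x[0].isdigit() and ". " in x
def pvPick (line : String) : Bool := pvDigitHead line && PySem.Str.isIn ". " line

-- the body of A's for-loop, state (scene_lines, choices, in_choices)
def pvStepA (st : List String × List String × Bool) (line : String) :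
    List String × List String × Bool :=
  if pvHdr line then (st.1, st.2.1, true)
  else if st.2.2 then
    (if (line != "") && pvDigitHead line && PySem.Str.isIn ". " line
     then (st.1, st.2.1 ++ [pvExtract line], st.2.2) else st)
  else (st.1 ++ [line], st.2.1, st.2.2)

def parse_scene_and_choices (text : String) : String × List String :=
  let st := (pvLines text).foldl pvStepA ([], [], false)
  let scene := PySem.Str.join "\n" st.1
  let choices := if st.2.1 = [] then
      ["Explore the path", "Investigate the object", "Rest and recover"]
    else st.2.1
  (PySem.Str.slice scene none (some 500), PySem.List.slice choices none (some 3))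

-- ===== PORT B =====
-- the body of B's for-loop over reversed(lines), state (rev_pending, choices)
def pvStepB (st : List String × List String) (l : String) : List String × List String :=
  if pvHdr l then
    ([], ((st.1.reverse).filter pvPick).map pvExtract ++ st.2)
  else (st.1 ++ [l], st.2)

def parse_scene_and_choices_alt (text : String) : String × List String :=
  let lines := pvLines text
  let st := lines.reverse.foldl pvStepB ([], [])
  let scene := PySem.Str.slice (PySem.Str.join "\n" st.1.reverse) none (some 500)
  let choices := if st.2 = [] then
      ["Explore the path", "Investigate the object", "Rest and recover"]
    else st.2
  (scene, PySem.List.slice choices none (some 3))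

-- ===== PRECONDITION & SPEC =====
def Spec_parse_scene_and_choices (text : String) (out : String × List String) : Prop := out = parse_scene_and_choices_alt text
instance (text : String) (out : String × List String) : Decidable (Spec_parse_scene_and_choices text out) := by unfold Spec_parse_scene_and_choices; infer_instance

-- ===== CLAIM (what is proved, stated in full; the proofs are below) =====
def Claim_equal_parse_scene_and_choices : Prop := ∀ (text : String), Dom_parse_scene_and_choices text → Spec_parse_scene_and_choices text (parse_scene_and_choices text)

-- ===== LEMMAS AND PROOFS =====

-- lowering leaves a digit unchanged
lemma pvLowerChar_digit (c : Char) (hd : PySem.Chars.isdigit c = true) :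
    PySem.Chars.lowerChar c = c := by
  simp [PySem.Chars.isdigit] at hd
  simp [PySem.Chars.lowerChar, PySem.Chars.isupper]
  intro h1 _
  exact absurd (le_trans h1 hd.2) (by decide)

-- a header line never starts with a digit
lemma pvHdr_not_pick (l : String) (h : pvHdr l = true) : pvPick l = false := by
  unfold pvHdr at h
  cases hl : l.toList with
  | nil => simp [PySem.Chars.startswith, PySem.Chars.lower, hl] at h
  | cons c r =>
    have hc : PySem.Chars.lowerChar c = 'c' ∨ PySem.Chars.lowerChar c = 'o' := by
      simp [PySem.Chars.startswith, PySem.Chars.lower, hl, List.isPrefixOf] at h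
      rcases h with h | h
      · exact Or.inl h.1.symm
      · exact Or.inr h.1.symm
    have hdig : pvDigitHead l = false := by
      simp only [pvDigitHead]
      have hg : PySem.Str.pyGet? l 0 = some c := by simp [hl]
      rw [hg]
      by_contra hb
      simp only [Bool.not_eq_false] at hb
      rw [pvLowerChar_digit c hb] at hc
      simp [PySem.Chars.isdigit] at hb
      rcases hc with hc | hc <;> subst hc <;> exact absurd hb.2 (by decide)
    simp [pvPick, hdig]

-- the guard "line and …" equals pvPick (pvDigitHead is false on "")
lemma pvGuard_eq_pick (l : String) :
    ((l != "") && pvDigitHead l && PySem.Str.isIn ". " l) = pvPick l := by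
  by_cases h : l = ""
  · subst h; decide
  · have hb : (l != "") = true := by simpa using h
    rw [hb, Bool.true_and, pvPick]

-- A, in-choices phase: the fold just filters and extracts
lemma pvFold_true (ls : List String) (s c : List String) :
    ls.foldl pvStepA (s, c, true) = (s, c ++ (ls.filter pvPick).map pvExtract, true) := by
  induction ls generalizing c with
  | nil => simp
  | cons l ls ih =>
    by_cases hh : pvHdr l = true
    · simp [List.foldl_cons, pvStepA, hh, ih, pvHdr_not_pick l hh]
    · simp only [List.foldl_cons, pvStepA, hh, if_false, Bool.false_eq_true, if_true,
        pvGuard_eq_pick]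
      by_cases hp : pvPick l = true
      · simp [hp, ih, List.append_assoc]
      · simp only [Bool.not_eq_true] at hp
        simp [hp, ih]

-- A, scan phase: everything before the first header is scene
lemma pvFold_false (ls : List String) (s : List String) :
    ls.foldl pvStepA (s, [], false) =
      (s ++ ls.take (ls.findIdx pvHdr),
       ((ls.drop (ls.findIdx pvHdr + 1)).filter pvPick).map pvExtract,
       decide (ls.findIdx pvHdr < ls.length)) := by
  induction ls generalizing s with
  | nil => simp
  | cons l ls ih =>
    by_cases hh : pvHdr l = true
    · simp [List.foldl_cons, pvStepA, hh, pvFold_true, List.findIdx_cons]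
    · simp only [List.foldl_cons, pvStepA, hh, Bool.false_eq_true, if_false, ih,
        List.findIdx_cons, List.length_cons]
      simp [List.take_succ_cons, List.drop_succ_cons, List.append_assoc]

-- splitting the pick-filter at the first header loses nothing (the header itself is never a pick)
lemma pvFilter_split (ls : List String) :
    (ls.filter pvPick).map pvExtract =
      ((ls.take (ls.findIdx pvHdr)).filter pvPick).map pvExtract ++
      ((ls.drop (ls.findIdx pvHdr + 1)).filter pvPick).map pvExtract := by
  induction ls with
  | nil => simp
  | cons l ls ih =>
    by_cases hh : pvHdr l = true
    · simp [List.findIdx_cons, hh, pvHdr_not_pick l hh]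
    · by_cases hp : pvPick l = true
      · simp [List.findIdx_cons, hh, hp, ih]
      · simp only [Bool.not_eq_true] at hp
        simp [List.findIdx_cons, hh, hp, ih]

-- B's backwards fold, characterised: pending = reversed prefix before the first header,
-- choices = extracted picks after it
lemma pvFoldB (ls : List String) :
    ls.foldr (fun l st => pvStepB st l) ([], []) =
      ((ls.take (ls.findIdx pvHdr)).reverse,
       ((ls.drop (ls.findIdx pvHdr + 1)).filter pvPick).map pvExtract) := by
  induction ls with
  | nil => simp
  | cons l ls ih =>
    rw [List.foldr_cons, ih]
    by_cases hh : pvHdr l = true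
    · simp only [pvStepB, hh, if_true, List.reverse_reverse, List.findIdx_cons]
      rw [← pvFilter_split]
      simp
    · simp only [pvStepB, hh, Bool.false_eq_true, if_false, List.findIdx_cons]
      simp [List.take_succ_cons, List.drop_succ_cons]

-- ===== VERDICT (by name: the statement is the Claim_ definition above) =====
theorem parse_scene_and_choices_spec : Claim_equal_parse_scene_and_choices := by
  intro text _
  unfold Spec_parse_scene_and_choices parse_scene_and_choices parse_scene_and_choices_alt
  simp only [List.foldl_reverse, pvFoldB, pvFold_false, List.nil_append,
    List.reverse_reverse]
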